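-- pv_equiv track=rewrite | github.com/atcfu/taac_2026-puiching-memory | config/gen/ctr_baseline/data.py | _resolve_post_feature_id
-- ===== SOURCE A (Python) =====
-- SEQUENCE_POST_FEATURE_IDS: dict[str, int] = {}
--
-- def _is_small_categorical_array(values: list[int]) -> bool:
-- 	if not values:
-- 		return False
-- 	return max(values) <= 128 and min(values) >= 0
--
-- def _rank_sequence_feature_ids(arrays: dict[int, list[int]], excluded_ids: set[int]) -> list[int]:
-- 	ranked: list[tuple[int, int, int, int]] = []
-- 	for feature_id, values in arrays.items():
-- 		if feature_id in excluded_ids or not values: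
-- 			continue
-- 		preview = values[: min(256, len(values))]
-- 		ranked.append((len(set(preview)), max(abs(value) for value in preview), len(values), feature_id))
-- 	ranked.sort(reverse=True)
-- 	return [feature_id for _, _, _, feature_id in ranked]
--
-- def _resolve_post_feature_id(
-- 	sequence_name: str,
-- 	arrays: dict[int, list[int]],
-- 	timestamp_feature_id: int | None,
-- ) -> int | None:
-- 	preferred = SEQUENCE_POST_FEATURE_IDS.get(sequence_name)
-- 	if preferred in arrays and preferred != timestamp_feature_id:
-- 		return preferred
-- 	for feature_id in _rank_sequence_feature_ids(arrays, {timestamp_feature_id} if timestamp_feature_id is not None else set()):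
-- 		if not _is_small_categorical_array(arrays[feature_id]):
-- 			return feature_id
-- 	ranked = _rank_sequence_feature_ids(arrays, {timestamp_feature_id} if timestamp_feature_id is not None else set())
-- 	return ranked[0] if ranked else None
-- ===== SOURCE B (Python) =====
-- def _resolve_post_feature_id(
-- 	sequence_name: str,
-- 	arrays: dict[int, list[int]],
-- 	timestamp_feature_id: int | None,
-- ) -> int | None:
-- 	# Single pass: track the best ranking key overall and the best among
-- 	# non-small-categorical arrays; no intermediate list, no sort.
-- 	# (SEQUENCE_POST_FEATURE_IDS is empty, so the "preferred" shortcut is dead code.)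
-- 	best_all = None
-- 	best_noncat = None
-- 	for feature_id, values in arrays.items():
-- 		if feature_id == timestamp_feature_id or not values:
-- 			continue
-- 		preview = values[:256]
-- 		key = (len(set(preview)), max(abs(v) for v in preview), len(values), feature_id)
-- 		if best_all is None or key > best_all:
-- 			best_all = key
-- 		if not (0 <= min(values) and max(values) <= 128):
-- 			if best_noncat is None or key > best_noncat:
-- 				best_noncat = key
-- 	best = best_noncat if best_noncat is not None else best_all
-- 	return best[3] if best is not None else None
-- ===== Notes on version B (the rewrite author's own statement) =====
-- stated objective: faster
-- what changed: Replaces building and fully sorting a list of ranking tuples (twice) plus a linear rescan with a single pass over arrays.items() that keeps two running maxima (best overall key, best non-small-categorical key) and drops the dead 'preferred' shortcut keyed by an empty module dict.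
import Mathlib
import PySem

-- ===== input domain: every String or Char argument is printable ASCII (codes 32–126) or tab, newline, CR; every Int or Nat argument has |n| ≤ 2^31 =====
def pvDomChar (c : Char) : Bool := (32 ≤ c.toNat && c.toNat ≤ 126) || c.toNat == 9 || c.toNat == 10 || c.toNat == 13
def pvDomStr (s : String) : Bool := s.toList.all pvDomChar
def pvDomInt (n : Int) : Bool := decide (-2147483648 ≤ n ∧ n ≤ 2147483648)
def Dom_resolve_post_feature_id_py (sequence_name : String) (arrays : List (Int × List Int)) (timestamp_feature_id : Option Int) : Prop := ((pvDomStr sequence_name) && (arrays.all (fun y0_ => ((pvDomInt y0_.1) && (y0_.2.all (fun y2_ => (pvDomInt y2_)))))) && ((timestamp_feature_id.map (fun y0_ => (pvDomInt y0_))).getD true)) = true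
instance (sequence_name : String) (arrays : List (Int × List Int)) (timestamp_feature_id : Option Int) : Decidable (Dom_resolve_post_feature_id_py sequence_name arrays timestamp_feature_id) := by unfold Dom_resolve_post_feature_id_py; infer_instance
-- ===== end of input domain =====

-- B replaces A's build-tuples + full reverse sort (done twice) + rescan with one pass
-- keeping two running maxima; equivalence of the returned Option Int is proved on all inputs.


-- ===== PORT A =====
-- ranking key tuple (len(set(preview)), max(abs(v) for v in preview), len(values), feature_id),
-- compared as Python compares tuples: lexicographically (hence the Lex product type)
def pvKey (fid : Int) (values : List Int) : Lex (Int × Lex (Int × Lex (Int × Int))) :=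
  let preview := PySem.List.slice values none (some (min 256 (values.length : Int)))
  toLex (((PySem.Set.ofList preview).length : Int),
    toLex ((PySem.List.max? (preview.map (fun v => |v|)) (fun y => y)).getD 0,
      toLex ((values.length : Int), fid)))

-- feature_id component of a ranking key
def pvFid (k : Lex (Int × Lex (Int × Lex (Int × Int)))) : Int :=
  (ofLex (ofLex (ofLex k).2).2).2

-- _is_small_categorical_array
def pvSmallCat (values : List Int) : Bool :=
  if values.isEmpty then false
  else decide ((PySem.List.max? values (fun y => y)).getD 0 ≤ 128) &&
       decide (0 ≤ (PySem.List.min? values (fun y => y)).getD 0)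

-- _rank_sequence_feature_ids
def pvRank (d : PySem.Dict Int (List Int)) (excluded : PySem.Set Int) : List Int :=
  let ranked := d.items.foldl
    (fun acc p => if excluded.contains p.1 || p.2.isEmpty then acc else acc ++ [pvKey p.1 p.2]) []
  (PySem.List.sorted ranked (fun k => k) true).map pvFid

def resolve_post_feature_id_py (sequence_name : String) (arrays : List (Int × List Int)) (timestamp_feature_id : Option Int) : Option Int :=
  let d := PySem.Dict.ofList arrays
  -- SEQUENCE_POST_FEATURE_IDS is the empty module dict, so preferred = None and
  -- 'preferred in arrays' (None against int keys) is False
  let preferred : Option Int := (PySem.Dict.empty : PySem.Dict String Int).get? sequence_name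
  if (match preferred with
      | some p => d.contains p && !(some p == timestamp_feature_id)
      | none => false) then preferred
  else
    let excluded : PySem.Set Int :=
      match timestamp_feature_id with
      | some t => PySem.Set.add PySem.Set.empty t
      | none => PySem.Set.empty
    -- arrays[feature_id]: the key is always present, so getD is exact here
    match (pvRank d excluded).find? (fun fid => !pvSmallCat (d.getD fid [])) with
    | some fid => some fid
    | none => (pvRank d excluded).head?

-- ===== PORT B =====
-- 'best is None or key > best' update
def pvBetter (best : Option (Lex (Int × Lex (Int × Lex (Int × Int)))))
    (k : Lex (Int × Lex (Int × Lex (Int × Int)))) : Option (Lex (Int × Lex (Int × Lex (Int × Int)))) :=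
  match best with
  | none => some k
  | some b => if b < k then some k else some b

def resolve_post_feature_id_py_alt (sequence_name : String) (arrays : List (Int × List Int)) (timestamp_feature_id : Option Int) : Option Int :=
  let d := PySem.Dict.ofList arrays
  let st := d.items.foldl
    (fun (st : Option (Lex (Int × Lex (Int × Lex (Int × Int)))) × Option (Lex (Int × Lex (Int × Lex (Int × Int))))) p =>
      if some p.1 == timestamp_feature_id || p.2.isEmpty then st
      else
        let k := pvKey p.1 p.2
        (pvBetter st.1 k,
         if !(decide (0 ≤ (PySem.List.min? p.2 (fun y => y)).getD 0) &&
              decide ((PySem.List.max? p.2 (fun y => y)).getD 0 ≤ 128))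
         then pvBetter st.2 k else st.2))
    (none, none)
  match (match st.2 with | some b => some b | none => st.1) with
  | some k => some (pvFid k)
  | none => none

-- ===== PRECONDITION & SPEC =====
def Spec_resolve_post_feature_id_py (sequence_name : String) (arrays : List (Int × List Int)) (timestamp_feature_id : Option Int) (out : Option Int) : Prop := out = resolve_post_feature_id_py_alt sequence_name arrays timestamp_feature_id
instance (sequence_name : String) (arrays : List (Int × List Int)) (timestamp_feature_id : Option Int) (out : Option Int) : Decidable (Spec_resolve_post_feature_id_py sequence_name arrays timestamp_feature_id out) := by unfold Spec_resolve_post_feature_id_py; infer_instance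

-- ===== CLAIM (what is proved, stated in full; the proofs are below) =====
def Claim_equal_resolve_post_feature_id_py : Prop := ∀ (sequence_name : String) (arrays : List (Int × List Int)) (timestamp_feature_id : Option Int), Dom_resolve_post_feature_id_py sequence_name arrays timestamp_feature_id → Spec_resolve_post_feature_id_py sequence_name arrays timestamp_feature_id (resolve_post_feature_id_py sequence_name arrays timestamp_feature_id)

-- ===== LEMMAS AND PROOFS =====

abbrev KK := Lex (Int × Lex (Int × Lex (Int × Int)))

def kfun (p : Int × List Int) : KK := pvKey p.1 p.2

def goodB (ts : Option Int) (p : Int × List Int) : Bool := !(some p.1 == ts || p.2.isEmpty)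

def ncatB (p : Int × List Int) : Bool :=
  !(decide (0 ≤ (PySem.List.min? p.2 (fun y => y)).getD 0) &&
    decide ((PySem.List.max? p.2 (fun y => y)).getD 0 ≤ 128))

def stepA (ts : Option Int) (s : Option KK) (p : Int × List Int) : Option KK :=
  if some p.1 == ts || p.2.isEmpty then s else pvBetter s (kfun p)

def stepN (ts : Option Int) (s : Option KK) (p : Int × List Int) : Option KK :=
  if some p.1 == ts || p.2.isEmpty then s
  else if ncatB p then pvBetter s (kfun p) else s

lemma foldl_pair (ts : Option Int) (l : List (Int × List Int)) (a b : Option KK) :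
    l.foldl
      (fun (st : Option KK × Option KK) p =>
        if some p.1 == ts || p.2.isEmpty then st
        else
          (pvBetter st.1 (pvKey p.1 p.2),
           if ncatB p then pvBetter st.2 (pvKey p.1 p.2) else st.2)) (a, b)
    = (l.foldl (stepA ts) a, l.foldl (stepN ts) b) := by
  induction l generalizing a b with
  | nil => rfl
  | cons x xs ih =>
    rw [List.foldl_cons, List.foldl_cons, List.foldl_cons,
      show (if some x.1 == ts || x.2.isEmpty then (a, b)
        else (pvBetter a (pvKey x.1 x.2), if ncatB x then pvBetter b (pvKey x.1 x.2) else b))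
        = (stepA ts a x, stepN ts b x) from by
          by_cases h : (some x.1 == ts || x.2.isEmpty) = true <;> simp [h, stepA, stepN, kfun]]
    exact ih _ _

lemma pvBetter_some (b k : KK) : pvBetter (some b) k = some (max b k) := by
  unfold pvBetter
  by_cases h : b < k
  · simp [h, max_eq_right h.le]
  · simp [h, max_eq_left (not_lt.1 h)]

lemma foldl_pvBetter_some (u : List KK) : ∀ b, u.foldl pvBetter (some b) = some (u.foldl max b) := by
  induction u with
  | nil => intro b; rfl
  | cons x xs ih => intro b; simp [List.foldl_cons, pvBetter_some, ih]

lemma head_max (s u : List KK) (hp : s.Pairwise (fun a b => b ≤ a)) (hperm : s.Perm u) :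
    u.foldl pvBetter none = s.head? := by
  cases u with
  | nil =>
    have hs : s = [] := hperm.eq_nil
    simp [hs]
  | cons x xs =>
    cases s with
    | nil => exact absurd hperm.symm.eq_nil (by simp)
    | cons m t =>
      simp only [List.foldl_cons, show pvBetter none x = some x from rfl, foldl_pvBetter_some,
        List.head?_cons]
      have hM := PySem.List.le_foldl_max xs x
      have hMmem : xs.foldl max x ∈ (x :: xs : List KK) := by
        rcases PySem.List.foldl_max_mem xs x with h | h
        · simp [h]
        · exact List.mem_cons_of_mem _ h
      have hmle : ∀ y ∈ (m :: t : List KK), y ≤ m := by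
        intro y hy
        rcases List.mem_cons.1 hy with rfl | hy
        · exact le_refl y
        · exact List.rel_of_pairwise_cons hp hy
      have h1 : xs.foldl max x ≤ m := hmle _ (hperm.mem_iff.2 hMmem)
      have h2 : m ≤ xs.foldl max x := by
        have hmmem : m ∈ (x :: xs : List KK) := hperm.mem_iff.1 (by simp)
        rcases List.mem_cons.1 hmmem with rfl | h
        · exact hM.1
        · exact hM.2 _ h
      exact congrArg some (le_antisymm h1 h2)

def exclS (ts : Option Int) : PySem.Set Int :=
  match ts with
  | some t => PySem.Set.add PySem.Set.empty t
  | none => PySem.Set.empty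

lemma contains_excl (ts : Option Int) (x : Int) :
    (exclS ts).contains x = (some x == ts) := by
  cases ts <;> simp [exclS, PySem.Set.add, PySem.Set.empty, PySem.Set.contains, beq_eq_decide]

def Pnc (d : PySem.Dict Int (List Int)) (k : KK) : Bool := !pvSmallCat (d.getD (pvFid k) [])

lemma rankA_eq (d : PySem.Dict Int (List Int)) (ts : Option Int) :
    pvRank d (exclS ts)
      = (PySem.List.sorted ((d.items.filter (goodB ts)).map kfun) (fun k => k) true).map pvFid := by
  unfold pvRank
  rw [show (fun (acc : List KK) (p : Int × List Int) =>
        if (exclS ts).contains p.1 || p.2.isEmpty then acc else acc ++ [pvKey p.1 p.2])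
      = (fun acc p => if goodB ts p then acc ++ [kfun p] else acc) from
    funext fun acc => funext fun p => by
      rw [contains_excl ts p.1]
      by_cases h : (some p.1 == ts || p.2.isEmpty) = true <;>
        simp [goodB, kfun, h] ]
  rw [PySem.List.foldl_append_if (goodB ts) kfun d.items []]
  simp

lemma stepA_foldl (ts : Option Int) (l : List (Int × List Int)) :
    l.foldl (stepA ts) none = ((l.filter (goodB ts)).map kfun).foldl pvBetter none := by
  rw [List.foldl_map, List.foldl_filter]
  rw [show (stepA ts)
      = (fun (x : Option KK) (y : Int × List Int) => if goodB ts y then pvBetter x (kfun y) else x) from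
    funext fun s => funext fun p => by
      by_cases h : (some p.1 == ts || p.2.isEmpty) = true <;> simp [stepA, goodB, h] ]

lemma stepN_foldl (ts : Option Int) (l : List (Int × List Int)) :
    l.foldl (stepN ts) none = (((l.filter (goodB ts)).filter ncatB).map kfun).foldl pvBetter none := by
  rw [List.foldl_map, List.foldl_filter, List.foldl_filter]
  rw [show (stepN ts)
      = (fun (x : Option KK) (y : Int × List Int) =>
          if goodB ts y then (if ncatB y then pvBetter x (kfun y) else x) else x) from
    funext fun s => funext fun p => by
      by_cases h : (some p.1 == ts || p.2.isEmpty) = true <;>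
        by_cases hn : ncatB p <;> simp [stepN, goodB, h, hn] ]

lemma ncat_congr (arrays : List (Int × List Int)) (ts : Option Int) :
    ((PySem.Dict.ofList arrays).items.filter (goodB ts)).filter ncatB
      = ((PySem.Dict.ofList arrays).items.filter (goodB ts)).filter
          (fun p => Pnc (PySem.Dict.ofList arrays) (kfun p)) := by
  apply List.filter_congr
  intro p hp
  have hmem : p ∈ (PySem.Dict.ofList arrays).items := List.mem_of_mem_filter hp
  have hgood : goodB ts p = true := List.of_mem_filter hp
  have hne : p.2.isEmpty = false := by
    unfold goodB at hgood
    simp only [Bool.not_eq_true', Bool.or_eq_false_iff] at hgood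
    exact hgood.2
  have hget : (PySem.Dict.ofList arrays).getD p.1 [] = p.2 := by
    obtain ⟨k, v⟩ := p
    exact PySem.Dict.getD_of_mem_items _ hmem (PySem.Dict.nodup_keys_ofList arrays) []
  show ncatB p = Pnc (PySem.Dict.ofList arrays) (kfun p)
  unfold Pnc
  have hfid : pvFid (kfun p) = p.1 := rfl
  rw [hfid, hget]
  unfold ncatB pvSmallCat
  rw [hne]
  simp [Bool.and_comm]

-- ===== VERDICT (by name: the statement is the Claim_ definition above) =====
theorem resolve_post_feature_id_py_spec : Claim_equal_resolve_post_feature_id_py := by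
  unfold Claim_equal_resolve_post_feature_id_py
  intro seq arrays ts _hdom
  unfold Spec_resolve_post_feature_id_py
  have hB : resolve_post_feature_id_py_alt seq arrays ts =
      (match (match (PySem.Dict.ofList arrays).items.foldl (stepN ts) none with
              | some b => some b
              | none => (PySem.Dict.ofList arrays).items.foldl (stepA ts) none) with
       | some k => some (pvFid k)
       | none => none) := by
    show (fun (st : Option KK × Option KK) =>
        (match (match st.2 with | some b => some b | none => st.1) with
         | some k => some (pvFid k)
         | none => none))
      ((PySem.Dict.ofList arrays).items.foldl
        (fun (st : Option KK × Option KK) p =>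
          if some p.1 == ts || p.2.isEmpty then st
          else
            (pvBetter st.1 (pvKey p.1 p.2),
             if ncatB p then pvBetter st.2 (pvKey p.1 p.2) else st.2)) (none, none)) = _
    rw [foldl_pair ts (PySem.Dict.ofList arrays).items none none]
  have hA : resolve_post_feature_id_py seq arrays ts =
      (match (pvRank (PySem.Dict.ofList arrays) (exclS ts)).find?
          (fun fid => !pvSmallCat ((PySem.Dict.ofList arrays).getD fid [])) with
       | some fid => some fid
       | none => (pvRank (PySem.Dict.ofList arrays) (exclS ts)).head?) := rfl
  rw [hA, hB]
  -- abbreviations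
  have hd := PySem.Dict.ofList arrays
  have hrank := rankA_eq (PySem.Dict.ofList arrays) ts
  -- the sorted key list
  have hs : (PySem.List.sorted ((((PySem.Dict.ofList arrays).items.filter (goodB ts)).map kfun)) (fun k => k) true).Pairwise
      (fun a b : KK => b ≤ a) := by
    have := PySem.List.sorted_pairwise_rev (((PySem.Dict.ofList arrays).items.filter (goodB ts)).map kfun) (fun k => k)
    exact this
  have hperm := PySem.List.sorted_perm (((PySem.Dict.ofList arrays).items.filter (goodB ts)).map kfun) (fun k : KK => k) true
  -- best overall = head of sorted
  have hAll : (PySem.Dict.ofList arrays).items.foldl (stepA ts) none =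
      (PySem.List.sorted (((PySem.Dict.ofList arrays).items.filter (goodB ts)).map kfun) (fun k => k) true).head? := by
    rw [stepA_foldl]
    exact head_max _ _ hs hperm
  -- best non-categorical = head of filtered sorted
  have hN : (PySem.Dict.ofList arrays).items.foldl (stepN ts) none =
      ((PySem.List.sorted (((PySem.Dict.ofList arrays).items.filter (goodB ts)).map kfun) (fun k => k) true).filter
        (Pnc (PySem.Dict.ofList arrays))).head? := by
    rw [stepN_foldl, ncat_congr arrays ts]
    rw [show ((PySem.Dict.ofList arrays).items.filter (goodB ts)).filter
          (fun p => Pnc (PySem.Dict.ofList arrays) (kfun p))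
        = ((PySem.Dict.ofList arrays).items.filter (goodB ts)).filter
          ((Pnc (PySem.Dict.ofList arrays)) ∘ kfun) from rfl]
    rw [← List.filter_map]
    exact head_max _ _ (List.Pairwise.filter _ hs) (hperm.filter _)
  -- A's find? over ids
  have hfind : ((PySem.List.sorted (((PySem.Dict.ofList arrays).items.filter (goodB ts)).map kfun) (fun k => k) true).map pvFid).find?
        (fun fid => !pvSmallCat ((PySem.Dict.ofList arrays).getD fid [])) =
      ((PySem.List.sorted (((PySem.Dict.ofList arrays).items.filter (goodB ts)).map kfun) (fun k => k) true).filter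
        (Pnc (PySem.Dict.ofList arrays))).head?.map pvFid := by
    rw [List.find?_map, List.head?_filter]
    rfl
  rw [hrank, hfind, hAll, hN]
  cases h2 : ((PySem.List.sorted (((PySem.Dict.ofList arrays).items.filter (goodB ts)).map kfun) (fun k => k) true).filter
      (Pnc (PySem.Dict.ofList arrays))).head? with
  | some k => rfl
  | none =>
    rw [List.head?_map]
    cases (PySem.List.sorted (((PySem.Dict.ofList arrays).items.filter (goodB ts)).map kfun) (fun k => k) true).head? with
    | some k => rfl
    | none => rfl
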